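-- pv_equiv track=rewrite | github.com/OpenSourceEconomics/pylcm | src/lcm/input_processing/regime_processing.py | _build_ordering_graph
-- ===== SOURCE A (Python) =====
-- def _build_ordering_graph(
--     regime_categories: list[tuple[str, tuple[str, ...]]],
-- ) -> tuple[dict[str, set[str]], set[str], dict[str, int]]:
--     """Build a directed graph of ordering constraints from regime categories."""
--     from collections import defaultdict  # noqa: PLC0415
--
--     edges: dict[str, set[str]] = defaultdict(set)
--     all_nodes: set[str] = set()
--     in_degree: dict[str, int] = defaultdict(int)
--
--     for _regime_name, categories in regime_categories:
--         for cat in categories: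
--             all_nodes.add(cat)
--             if cat not in in_degree:
--                 in_degree[cat] = 0
--         for i in range(len(categories) - 1):
--             a, b = categories[i], categories[i + 1]
--             if b not in edges[a]:
--                 edges[a].add(b)
--                 in_degree[b] += 1
--
--     return edges, all_nodes, in_degree
-- ===== SOURCE B (Python) =====
-- def _build_ordering_graph(
--     regime_categories: list[tuple[str, tuple[str, ...]]],
-- ) -> tuple[dict[str, set[str]], set[str], dict[str, int]]:
--     """Build a directed graph of ordering constraints from regime categories.
--
--     Pass 1 collects the nodes (seeding every category's in-degree to 0) and the
--     deduplicated adjacency sets; pass 2 derives the in-degrees from the finished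
--     graph: each target of each edge gains one.  Because the adjacency values are
--     sets, every distinct edge counts exactly once, and since every target is
--     already seeded, the increment order cannot affect the result.
--     """
--     from collections import defaultdict  # noqa: PLC0415
--
--     edges: dict[str, set[str]] = defaultdict(set)
--     all_nodes: set[str] = set()
--     in_degree: dict[str, int] = defaultdict(int)
--
--     for _regime_name, categories in regime_categories:
--         for cat in categories:
--             all_nodes.add(cat)
--             in_degree.setdefault(cat, 0)
--         for a, b in zip(categories, categories[1:]):
--             edges[a].add(b)
--
--     for targets in edges.values():
--         for b in targets:
--             in_degree[b] += 1
--
--     return edges, all_nodes, in_degree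
-- ===== Notes on version B (the rewrite author's own statement) =====
-- stated objective: alternative
-- what changed: B splits A's single interleaved loop into two passes: pass 1 builds the node set, zero-seeded in-degree dict and deduplicated adjacency sets (pairing consecutive categories with zip instead of index arithmetic, and dropping A's membership test and on-the-fly increment), and pass 2 derives every in-degree from the finished graph by giving each edge target one increment.
import Mathlib
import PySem

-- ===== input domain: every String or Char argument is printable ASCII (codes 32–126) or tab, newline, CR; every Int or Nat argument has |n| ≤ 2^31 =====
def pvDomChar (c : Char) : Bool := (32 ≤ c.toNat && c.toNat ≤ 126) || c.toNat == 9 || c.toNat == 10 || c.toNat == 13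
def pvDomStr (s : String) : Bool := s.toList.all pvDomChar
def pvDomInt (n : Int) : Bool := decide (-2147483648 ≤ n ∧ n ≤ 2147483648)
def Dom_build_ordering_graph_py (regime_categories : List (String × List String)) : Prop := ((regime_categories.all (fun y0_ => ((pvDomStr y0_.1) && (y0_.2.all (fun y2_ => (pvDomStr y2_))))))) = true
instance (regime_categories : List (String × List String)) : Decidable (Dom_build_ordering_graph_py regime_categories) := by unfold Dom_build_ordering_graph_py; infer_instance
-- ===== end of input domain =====

-- B replaces A's single interleaved loop (membership test + in-degree increment per new edge) by two
-- passes: build nodes, zero-seeded in-degrees and deduplicated adjacency sets first, then derive the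
-- in-degrees from the finished graph (objective: alternative decomposition, same cost).
-- B's pass 2 iterates Python sets; the result is order-independent since every incremented key is
-- already present, so the dict's key order cannot depend on the set iteration order.

-- ===== PORT A =====
-- if cat not in in_degree: in_degree[cat] = 0
def bogSeedA (d : PySem.Dict String Int) (cat : String) : PySem.Dict String Int :=
  if d.contains cat then d else d.insert cat 0

-- body of A's inner edge loop: edges[a] (defaultdict access creates the key),
-- if b not in edges[a]: edges[a].add(b); in_degree[b] += 1
def bogEdgeA (q : PySem.Dict String (PySem.Set String) × PySem.Dict String Int)
    (a b : String) : PySem.Dict String (PySem.Set String) × PySem.Dict String Int :=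
  let E := if q.1.contains a then q.1 else q.1.insert a PySem.Set.empty
  let s := E.getD a PySem.Set.empty
  if PySem.Set.contains s b = false then
    (E.insert a (PySem.Set.add s b), q.2.modify b 0 (· + 1))
  else (E, q.2)

-- one iteration of A's outer loop over regime_categories
def bogStepA (st : PySem.Dict String (PySem.Set String) × PySem.Set String × PySem.Dict String Int)
    (rc : String × List String) :
    PySem.Dict String (PySem.Set String) × PySem.Set String × PySem.Dict String Int :=
  let cats := rc.2
  let nd := cats.foldl
    (fun (p : PySem.Set String × PySem.Dict String Int) cat =>
      (PySem.Set.add p.1 cat, bogSeedA p.2 cat)) (st.2.1, st.2.2)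
  let eq := (PySem.List.pyRange 0 (PySem.List.len cats - 1) 1).foldl
    (fun q i => bogEdgeA q (PySem.List.pyGetD cats i "") (PySem.List.pyGetD cats (i + 1) ""))
    (st.1, nd.2)
  (eq.1, nd.1, eq.2)

def build_ordering_graph_py (regime_categories : List (String × List String)) :
    (List (String × List String)) × List String × (List (String × Int)) :=
  let st := regime_categories.foldl bogStepA (PySem.Dict.empty, PySem.Set.empty, PySem.Dict.empty)
  (st.1.items, st.2.1, st.2.2.items)

-- ===== PORT B =====
-- in_degree.setdefault(cat, 0)
def bogSeedB (d : PySem.Dict String Int) (cat : String) : PySem.Dict String Int :=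
  d.setdefault cat 0

-- edges[a].add(b)  (defaultdict access + set add in one step)
def bogEdgeB (E : PySem.Dict String (PySem.Set String)) (ab : String × String) :
    PySem.Dict String (PySem.Set String) :=
  E.insert ab.1 (PySem.Set.add (E.getD ab.1 PySem.Set.empty) ab.2)

-- pass 1: one regime — collect nodes, seed in-degrees to 0, add the consecutive pairs
def bogStepB (st : PySem.Dict String (PySem.Set String) × PySem.Set String × PySem.Dict String Int)
    (rc : String × List String) :
    PySem.Dict String (PySem.Set String) × PySem.Set String × PySem.Dict String Int :=
  let cats := rc.2
  let nd := cats.foldl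
    (fun (p : PySem.Set String × PySem.Dict String Int) cat =>
      (PySem.Set.add p.1 cat, bogSeedB p.2 cat)) (st.2.1, st.2.2)
  let E := (cats.zip cats.tail).foldl bogEdgeB st.1
  (E, nd.1, nd.2)

-- pass 2: for targets in edges.values(): for b in targets: in_degree[b] += 1
def bogCount (E : PySem.Dict String (PySem.Set String)) (d : PySem.Dict String Int) :
    PySem.Dict String Int :=
  E.values.foldl (fun d s => s.foldl (fun d b => d.modify b 0 (· + 1)) d) d

def build_ordering_graph_py_alt (regime_categories : List (String × List String)) :
    (List (String × List String)) × List String × (List (String × Int)) :=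
  let st := regime_categories.foldl bogStepB (PySem.Dict.empty, PySem.Set.empty, PySem.Dict.empty)
  (st.1.items, st.2.1, (bogCount st.1 st.2.2).items)

-- ===== PRECONDITION & SPEC =====
def Spec_build_ordering_graph_py (regime_categories : List (String × List String)) (out : (List (String × List String)) × List String × (List (String × Int))) : Prop := out = build_ordering_graph_py_alt regime_categories
instance (regime_categories : List (String × List String)) (out : (List (String × List String)) × List String × (List (String × Int))) : Decidable (Spec_build_ordering_graph_py regime_categories out) := by unfold Spec_build_ordering_graph_py; infer_instance

-- ===== CLAIM (what is proved, stated in full; the proofs are below) =====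
def Claim_equal_build_ordering_graph_py : Prop := ∀ (regime_categories : List (String × List String)), Dom_build_ordering_graph_py regime_categories → Spec_build_ordering_graph_py regime_categories (build_ordering_graph_py regime_categories)

-- ===== LEMMAS AND PROOFS =====

-- number of (deduplicated) edges whose target is k, read off an items list
def bogCnt (I : List (String × List String)) (k : String) : Int :=
  (I.map (fun p => (p.2.count k : Int))).sum

-- the coupling invariant between A's state (E, D) and B's pass-1 state (E, D0):
-- A's in_degree is B's zero-seeded dict with the edge-target counts of E added in,
-- E's keys are unique, its adjacency values are duplicate-free, and every edge
-- target is already a key of D0.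
def bogInv (E : PySem.Dict String (PySem.Set String)) (D D0 : PySem.Dict String Int) : Prop :=
  D.items = D0.items.map (fun p => (p.1, p.2 + bogCnt E.items p.1))
  ∧ E.keys.Nodup ∧ D0.keys.Nodup
  ∧ ∀ p ∈ E.items, p.2.Nodup ∧ ∀ b ∈ p.2, D0.contains b = true

theorem bog_keys_of_items_map (D D0 : PySem.Dict String Int) (f : String × Int → Int)
    (h : D.items = D0.items.map (fun p => (p.1, f p))) : D.keys = D0.keys := by
  simp [PySem.Dict.keys, h, List.map_map, Function.comp]

theorem bog_contains_eq (D D0 : PySem.Dict String Int) (f : String × Int → Int)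
    (h : D.items = D0.items.map (fun p => (p.1, f p))) (c : String) :
    D.contains c = D0.contains c := by
  rw [PySem.Dict.contains_eq_decide_mem_keys, PySem.Dict.contains_eq_decide_mem_keys,
    bog_keys_of_items_map D D0 f h]

theorem bog_cnt_eq_zero (I : List (String × List String)) (c : String)
    (h : ∀ p ∈ I, c ∉ p.2) : bogCnt I c = 0 := by
  induction I with
  | nil => simp [bogCnt]
  | cons q I ih =>
    have h1 : q.2.count c = 0 := List.count_eq_zero.mpr (h q (by simp))
    have h2 : bogCnt I c = 0 := ih (fun p hp => h p (by simp [hp]))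
    simp [bogCnt] at h2 ⊢
    omega

theorem bog_insert_getD_self (E : PySem.Dict String (PySem.Set String)) (a : String)
    (hnd : E.keys.Nodup) (hc : E.contains a = true) :
    E.insert a (E.getD a PySem.Set.empty) = E := by
  apply PySem.Dict.ext
  rw [PySem.Dict.items_insert_of_contains E _ hc]
  apply List.map_congr_left ?_ |>.trans (List.map_id E.items)
  intro p hp
  obtain ⟨p1, p2⟩ := p
  by_cases h : p1 = a
  · subst h
    have hg := PySem.Dict.getD_of_mem_items E hp hnd PySem.Set.empty
    simp
    exact hg
  · simp [h]

-- modifying an existing key rewrites exactly that item's value in place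
theorem bog_modify_items (D : PySem.Dict String Int) (b : String) (f : Int → Int)
    (hnd : D.keys.Nodup) (hc : D.contains b = true) :
    (D.modify b 0 f).items = D.items.map (fun p => if p.1 = b then (p.1, f p.2) else p) := by
  show (D.insert b (f (D.getD b 0))).items = _
  rw [PySem.Dict.items_insert_of_contains D _ hc]
  apply List.map_congr_left
  intro p hp
  obtain ⟨p1, p2⟩ := p
  by_cases h : p1 = b
  · subst h
    have hg := PySem.Dict.getD_of_mem_items D hp hnd 0
    simp [hg]
  · simp [h]

-- the inner pass-2 loop adds, to every entry, the number of occurrences of its key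
theorem bog_inner_items (s : List String) : ∀ (D : PySem.Dict String Int), D.keys.Nodup →
    (∀ b ∈ s, D.contains b = true) →
    (s.foldl (fun d b => d.modify b 0 (· + 1)) D).items
      = D.items.map (fun p => (p.1, p.2 + (s.count p.1 : Int))) := by
  induction s with
  | nil =>
    intro D _ _
    simp
  | cons b s ih =>
    intro D hnd hall
    have hcb : D.contains b = true := hall b (by simp)
    have hitems := bog_modify_items D b (· + 1) hnd hcb
    have hkeys : (D.modify b 0 (· + 1)).keys = D.keys := by
      simp only [PySem.Dict.keys, hitems, List.map_map]
      apply List.map_congr_left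
      intro p _
      by_cases h : p.1 = b <;> simp [Function.comp, h]
    have hnd' : (D.modify b 0 (· + 1)).keys.Nodup := by rw [hkeys]; exact hnd
    have hall' : ∀ c ∈ s, (D.modify b 0 (· + 1)).contains c = true := by
      intro c hc
      rw [PySem.Dict.contains_eq_decide_mem_keys, hkeys,
        ← PySem.Dict.contains_eq_decide_mem_keys]
      exact hall c (by simp [hc])
    rw [List.foldl_cons, ih _ hnd' hall', hitems, List.map_map]
    apply List.map_congr_left
    intro p _
    by_cases h : p.1 = b
    · simp [Function.comp, h, List.count_cons]
      push_cast
      ring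
    · simp [Function.comp, h, List.count_cons, Ne.symm h]

-- the whole pass 2 adds bogCnt of the (finished) edge list to every entry
theorem bog_outer_items (I : List (String × List String)) : ∀ (D : PySem.Dict String Int),
    D.keys.Nodup → (∀ p ∈ I, ∀ b ∈ p.2, D.contains b = true) →
    (I.foldl (fun d p => p.2.foldl (fun d b => d.modify b 0 (· + 1)) d) D).items
      = D.items.map (fun q => (q.1, q.2 + bogCnt I q.1)) := by
  induction I with
  | nil =>
    intro D _ _
    simp [bogCnt]
  | cons p I ih =>
    intro D hnd hall
    have hp := hall p (by simp)
    have hitems := bog_inner_items p.2 D hnd hp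
    have hkeys : (p.2.foldl (fun d b => d.modify b 0 (· + 1)) D).keys = D.keys := by
      simp [PySem.Dict.keys, hitems, List.map_map, Function.comp]
    have hnd' : (p.2.foldl (fun d b => d.modify b 0 (· + 1)) D).keys.Nodup := by
      rw [hkeys]; exact hnd
    have hall' : ∀ q ∈ I, ∀ b ∈ q.2,
        (p.2.foldl (fun d b => d.modify b 0 (· + 1)) D).contains b = true := by
      intro q hq b hb
      rw [PySem.Dict.contains_eq_decide_mem_keys, hkeys,
        ← PySem.Dict.contains_eq_decide_mem_keys]
      exact hall q (by simp [hq]) b hb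
    rw [List.foldl_cons, ih _ hnd' hall', hitems, List.map_map]
    apply List.map_congr_left
    intro q _
    simp [Function.comp, bogCnt]
    ring

-- replacing the (unique) item at key a by its set with b appended adds one occurrence of b
theorem bog_cnt_replace (a : String) (s : List String) (b k : String) :
    ∀ (I : List (String × List String)), (I.map (·.1)).Nodup → (a, s) ∈ I →
    bogCnt (I.map (fun p => if p.1 = a then (a, s ++ [b]) else p)) k
      = bogCnt I k + (if k = b then 1 else 0) := by
  intro I
  induction I with
  | nil => simp
  | cons q I ih =>
    intro hnd hmem
    rw [List.map_cons, List.nodup_cons] at hnd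
    obtain ⟨hnd1, hnd2⟩ := hnd
    rcases List.mem_cons.mp hmem with hq | hq
    · have hq1 : q.1 = a := by rw [← hq]
      have hq2 : q.2 = s := by rw [← hq]
      have hid : I.map (fun p => if p.1 = a then (a, s ++ [b]) else p) = I := by
        apply List.map_congr_left ?_ |>.trans (List.map_id I)
        intro p hp
        have hpa : p.1 ≠ a := by
          intro hpa
          apply hnd1
          rw [hq1, ← hpa]
          exact List.mem_map_of_mem hp
        simp [hpa]
      rw [List.map_cons, hid, if_pos hq1]
      simp only [bogCnt, List.map_cons, List.sum_cons, hq2]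
      have hc : (((s ++ [b]).count k : Nat) : Int)
          = ((s.count k : Nat) : Int) + (if k = b then 1 else 0) := by
        by_cases h : k = b
        · simp [List.count_append, h]
        · simp [List.count_append, List.count_singleton, h, Ne.symm h]
      rw [hc]
      ring
    · have hq1 : q.1 ≠ a := by
        intro hpa
        apply hnd1
        rw [hpa]
        exact List.mem_map_of_mem hq
      rw [List.map_cons, if_neg hq1]
      simp only [bogCnt, List.map_cons, List.sum_cons]
      have hI := ih hnd2 hq
      simp only [bogCnt] at hI
      rw [hI]
      ring

-- appending a fresh item (a, [b]) adds one occurrence of b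
theorem bog_cnt_append (I : List (String × List String)) (a b k : String) :
    bogCnt (I ++ [(a, [b])]) k = bogCnt I k + (if k = b then 1 else 0) := by
  by_cases h : k = b
  · simp [bogCnt, List.count_singleton, h]
  · simp [bogCnt, List.count_singleton, h, Ne.symm h]

-- one edge pair: A's guarded update and B's unconditional set-add produce the same
-- edge dict, and the invariant is maintained
set_option maxRecDepth 8192 in
theorem bog_edge_step (E : PySem.Dict String (PySem.Set String)) (D D0 : PySem.Dict String Int)
    (a b : String) (hInv : bogInv E D D0) (hb : D0.contains b = true) :
    (bogEdgeA (E, D) a b).1 = bogEdgeB E (a, b)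
      ∧ bogInv (bogEdgeB E (a, b)) (bogEdgeA (E, D) a b).2 D0 := by
  obtain ⟨hmap, hndE, hnd0, hval⟩ := hInv
  have hDkeys : D.keys = D0.keys :=
    bog_keys_of_items_map D D0 (fun p => p.2 + bogCnt E.items p.1) hmap
  have hndD : D.keys.Nodup := by rw [hDkeys]; exact hnd0
  have hDb : D.contains b = true := by
    rw [PySem.Dict.contains_eq_decide_mem_keys, hDkeys,
      ← PySem.Dict.contains_eq_decide_mem_keys]
    exact hb
  have hDmod : (D.modify b 0 (· + 1)).items
      = D.items.map (fun p => if p.1 = b then (p.1, p.2 + 1) else p) :=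
    bog_modify_items D b (· + 1) hndD hDb
  by_cases hA : E.contains a = true
  · -- a is already a key of edges
    obtain ⟨v, hv⟩ : ∃ v, E.get? a = some v := by
      have := PySem.Dict.contains_eq_isSome_get? E a
      rw [hA] at this
      exact Option.isSome_iff_exists.mp this.symm
    have hgetD : E.getD a PySem.Set.empty = v := by
      rw [PySem.Dict.getD_eq_get?_getD, hv]
      rfl
    have hmemv : (a, v) ∈ E.items := PySem.Dict.mem_items_of_get?_eq_some E hv
    have hvdup : v.Nodup := (hval (a, v) hmemv).1
    have hvtar : ∀ c ∈ v, D0.contains c = true := (hval (a, v) hmemv).2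
    have e1 : (if E.contains a = true then E else E.insert a PySem.Set.empty) = E := by
      rw [hA]
      exact if_pos rfl
    have hshape : bogEdgeA (E, D) a b
        = (if PySem.Set.contains (E.getD a PySem.Set.empty) b = false
           then (E.insert a (PySem.Set.add (E.getD a PySem.Set.empty) b), D.modify b 0 (· + 1))
           else (E, D)) := by
      show (if PySem.Set.contains
              ((if E.contains a = true then E else E.insert a PySem.Set.empty).getD a
                PySem.Set.empty) b = false
            then ((if E.contains a = true then E else E.insert a PySem.Set.empty).insert a
                    (PySem.Set.add
                      ((if E.contains a = true then E
                        else E.insert a PySem.Set.empty).getD a PySem.Set.empty) b),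
                  D.modify b 0 (· + 1))
            else ((if E.contains a = true then E else E.insert a PySem.Set.empty), D)) = _
      rw [e1]
    by_cases hbs : b ∈ v
    · -- edge already present: both sides leave everything unchanged
      have hsc : PySem.Set.contains (E.getD a PySem.Set.empty) b = true := by
        rw [hgetD]
        simp [PySem.Set.contains_eq_listContains, hbs]
      have hAeq : bogEdgeA (E, D) a b = (E, D) := by
        rw [hshape, if_neg (show ¬ PySem.Set.contains (E.getD a PySem.Set.empty) b = false
          from by rw [hsc]; simp)]
      have hBeq : bogEdgeB E (a, b) = E := by
        have hae : PySem.Set.add (E.getD a PySem.Set.empty) b = E.getD a PySem.Set.empty := by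
          rw [hgetD]
          exact PySem.Set.add_of_mem hbs
        show E.insert a (PySem.Set.add (E.getD a PySem.Set.empty) b) = E
        rw [hae]
        exact bog_insert_getD_self E a hndE hA
      rw [hAeq, hBeq]
      exact ⟨rfl, hmap, hndE, hnd0, hval⟩
    · -- new edge from an existing source
      have hsc : PySem.Set.contains (E.getD a PySem.Set.empty) b = false := by
        rw [hgetD]
        simp [PySem.Set.contains_eq_listContains, hbs]
      have hAeq : bogEdgeA (E, D) a b
          = (E.insert a (PySem.Set.add (E.getD a PySem.Set.empty) b), D.modify b 0 (· + 1)) := by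
        rw [hshape, if_pos hsc]
      have hBeq : bogEdgeB E (a, b)
          = E.insert a (PySem.Set.add (E.getD a PySem.Set.empty) b) := rfl
      have hadd : PySem.Set.add (E.getD a PySem.Set.empty) b = v ++ [b] := by
        rw [hgetD]; exact PySem.Set.add_of_not_mem hbs
      have hcnt : ∀ k, bogCnt (E.insert a (PySem.Set.add (E.getD a PySem.Set.empty) b)).items k
          = bogCnt E.items k + (if k = b then 1 else 0) := by
        intro k
        rw [PySem.Dict.items_insert_of_contains E _ hA, hadd]
        have hfe : (fun p : String × List String => if (p.1 == a) = true then (a, v ++ [b]) else p)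
            = (fun p : String × List String => if p.1 = a then (a, v ++ [b]) else p) := by
          funext p
          by_cases h : p.1 = a <;> simp [h]
        rw [hfe]
        exact bog_cnt_replace a v b k E.items hndE hmemv
      rw [hAeq, hBeq]
      refine ⟨rfl, ?_, PySem.Dict.nodup_keys_insert E a _ hndE, hnd0, ?_⟩
      · rw [hDmod, hmap, List.map_map]
        apply List.map_congr_left
        intro p _
        simp only [Function.comp_apply]
        rw [hcnt p.1]
        by_cases h : p.1 = b
        · rw [if_pos h, if_pos h]
          exact Prod.ext rfl (by ring)
        · rw [if_neg h, if_neg h]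
          exact Prod.ext rfl (by ring)
      · intro p hp
        rw [PySem.Dict.mem_items_insert] at hp
        rcases hp with hp | ⟨hp, _⟩
        · rw [hp]
          constructor
          · show (PySem.Set.add (E.getD a PySem.Set.empty) b).Nodup
            rw [hadd, ← List.concat_eq_append]
            exact List.Nodup.concat hbs hvdup
          · intro c hc
            rw [hadd] at hc
            rcases List.mem_append.mp hc with hc | hc
            · exact hvtar c hc
            · simp at hc; rw [hc]; exact hb
        · exact hval p hp
  · -- a is a fresh source key
    have hA' : E.contains a = false := by revert hA; cases E.contains a <;> simp
    have hgetD0 : E.getD a PySem.Set.empty = PySem.Set.empty :=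
      PySem.Dict.getD_of_not_contains E _ hA'
    have hE1 : (E.insert a PySem.Set.empty).getD a PySem.Set.empty = PySem.Set.empty :=
      PySem.Dict.getD_insert_self E a PySem.Set.empty PySem.Set.empty
    have hsc : PySem.Set.contains (PySem.Set.empty : PySem.Set String) b = false := rfl
    have e1 : (if E.contains a = true then E else E.insert a PySem.Set.empty)
        = E.insert a PySem.Set.empty := by
      rw [hA']
      simp
    have hAeq : bogEdgeA (E, D) a b
        = (E.insert a (PySem.Set.add PySem.Set.empty b), D.modify b 0 (· + 1)) := by
      show (if PySem.Set.contains
              ((if E.contains a = true then E else E.insert a PySem.Set.empty).getD a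
                PySem.Set.empty) b = false
            then ((if E.contains a = true then E else E.insert a PySem.Set.empty).insert a
                    (PySem.Set.add
                      ((if E.contains a = true then E
                        else E.insert a PySem.Set.empty).getD a PySem.Set.empty) b),
                  D.modify b 0 (· + 1))
            else ((if E.contains a = true then E else E.insert a PySem.Set.empty), D)) = _
      rw [e1, hE1, if_pos hsc, PySem.Dict.insert_insert_self]
    have hBeq : bogEdgeB E (a, b) = E.insert a (PySem.Set.add PySem.Set.empty b) := by
      simp only [bogEdgeB, hgetD0]
    rw [hAeq, hBeq]
    have hcnt : ∀ k, bogCnt (E.insert a (PySem.Set.add PySem.Set.empty b)).items k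
        = bogCnt E.items k + (if k = b then 1 else 0) := by
      intro k
      rw [PySem.Dict.items_insert_of_not_contains E _ hA']
      exact bog_cnt_append E.items a b k
    refine ⟨rfl, ?_, PySem.Dict.nodup_keys_insert E a _ hndE, hnd0, ?_⟩
    · rw [hDmod, hmap, List.map_map]
      apply List.map_congr_left
      intro p _
      simp only [Function.comp_apply]
      rw [hcnt p.1]
      by_cases h : p.1 = b
      · rw [if_pos h, if_pos h]
        exact Prod.ext rfl (by ring)
      · rw [if_neg h, if_neg h]
        exact Prod.ext rfl (by ring)
    · intro p hp
      rw [PySem.Dict.mem_items_insert] at hp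
      rcases hp with hp | ⟨hp, _⟩
      · rw [hp]
        refine ⟨by simp [PySem.Set.add], ?_⟩
        intro c hc
        simp [PySem.Set.add] at hc
        rw [hc]; exact hb
      · exact hval p hp

-- the edge loops of A and B, run over the same pair list, stay coupled
theorem bog_edge_fold (D0 : PySem.Dict String Int) (ps : List (String × String)) :
    ∀ (E : PySem.Dict String (PySem.Set String)) (D : PySem.Dict String Int),
    bogInv E D D0 → (∀ ab ∈ ps, D0.contains ab.2 = true) →
    (ps.foldl (fun q ab => bogEdgeA q ab.1 ab.2) (E, D)).1 = ps.foldl bogEdgeB E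
      ∧ bogInv (ps.foldl bogEdgeB E)
          (ps.foldl (fun q ab => bogEdgeA q ab.1 ab.2) (E, D)).2 D0 := by
  induction ps with
  | nil =>
    intro E D hInv _
    exact ⟨rfl, hInv⟩
  | cons ab ps ih =>
    intro E D hInv hall
    obtain ⟨h1, h2⟩ := bog_edge_step E D D0 ab.1 ab.2 hInv (hall ab (by simp))
    have hEta : bogEdgeA (E, D) ab.1 ab.2
        = (bogEdgeB E (ab.1, ab.2), (bogEdgeA (E, D) ab.1 ab.2).2) := by
      rw [← h1]
    have hab : (ab.1, ab.2) = ab := rfl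
    rw [hab] at hEta h2
    rw [List.foldl_cons, List.foldl_cons, hEta]
    exact ih (bogEdgeB E ab) (bogEdgeA (E, D) ab.1 ab.2).2 h2
      (fun c hc => hall c (by simp [hc]))

-- A's index loop over range(len(cats)-1) is the fold over consecutive pairs
theorem bog_range_zip {α : Type} (g : α → String → String → α) (cats : List String)
    (q0 : α) :
    (PySem.List.pyRange 0 (PySem.List.len cats - 1) 1).foldl
      (fun q i => g q (PySem.List.pyGetD cats i "") (PySem.List.pyGetD cats (i + 1) ""))
      q0
    = (cats.zip cats.tail).foldl (fun q ab => g q ab.1 ab.2) q0 := by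
  cases cats with
  | nil => simp [PySem.List.len]
  | cons c cs =>
    have hlen : PySem.List.len (c :: cs) - 1 = ((cs.length : Nat) : Int) := by
      simp [PySem.List.len_eq]
    rw [hlen, PySem.List.pyRange_zero_natCast, List.foldl_map]
    have hmap : (List.range cs.length).map
        (fun k => ((c :: cs).getD k "", (c :: cs).getD (k + 1) ""))
        = (c :: cs).zip cs := by
      apply List.ext_getElem
      · simp [List.length_zip]
      · intro i h1 h2
        have hi : i < cs.length := by simpa using h1
        have hi1 : i < (c :: cs).length := by simp; omega
        have hi2 : i + 1 < (c :: cs).length := by simp; omega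
        simp only [List.getElem_map, List.getElem_range, List.getElem_zip]
        rw [List.getD_eq_getElem _ _ hi1, List.getD_eq_getElem _ _ hi2]
        simp
    have hfold : ∀ (k : Nat) (q : α),
        g q (PySem.List.pyGetD (c :: cs) (k : Int) "")
            (PySem.List.pyGetD (c :: cs) ((k : Int) + 1) "")
          = g q ((c :: cs).getD k "") ((c :: cs).getD (k + 1) "") := by
      intro k q
      have h1 : PySem.List.pyGetD (c :: cs) (k : Int) "" = (c :: cs).getD k "" :=
        PySem.List.pyGetD_natCast (c :: cs) k ""
      have h2 : PySem.List.pyGetD (c :: cs) ((k : Int) + 1) "" = (c :: cs).getD (k + 1) "" := by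
        have hcast : ((k : Int) + 1) = ((k + 1 : Nat) : Int) := by push_cast; ring
        rw [hcast, PySem.List.pyGetD_natCast]
      rw [h1, h2]
    have hfinal : ∀ (l : List Nat) (q0 : α),
        l.foldl (fun q k => g q ((c :: cs).getD k "") ((c :: cs).getD (k + 1) "")) q0
          = (l.map (fun k => ((c :: cs).getD k "", (c :: cs).getD (k + 1) ""))).foldl
              (fun q ab => g q ab.1 ab.2) q0 := by
      intro l q0
      rw [List.foldl_map]
    simp only [hfold]
    rw [hfinal (List.range cs.length) q0, hmap]
    rfl

-- seeding keys: after pass-1 node loop the keys are the old keys plus the categories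
theorem bog_seed_keys (cats : List String) : ∀ (D0 : PySem.Dict String Int) (c : String),
    c ∈ (cats.foldl bogSeedB D0).keys ↔ c ∈ D0.keys ∨ c ∈ cats := by
  induction cats with
  | nil => intro D0 c; simp
  | cons x cats ih =>
    intro D0 c
    rw [List.foldl_cons, ih]
    simp only [bogSeedB]
    by_cases hx : D0.contains x = true
    · rw [PySem.Dict.setdefault_of_contains D0 0 hx]
      constructor
      · rintro (h | h)
        · exact Or.inl h
        · exact Or.inr (by simp [h])
      · rintro (h | h)
        · exact Or.inl h
        · rcases List.mem_cons.mp h with h | h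
          · exact Or.inl (by rw [h]; exact (PySem.Dict.contains_iff_mem_keys D0 x).mp hx)
          · exact Or.inr h
    · have hx' : D0.contains x = false := by revert hx; cases D0.contains x <;> simp
      rw [PySem.Dict.setdefault_of_not_contains D0 0 hx',
        PySem.Dict.keys_insert_of_not_contains D0 0 hx']
      constructor
      · rintro (h | h)
        · rcases List.mem_append.mp h with h | h
          · exact Or.inl h
          · simp at h; exact Or.inr (by simp [h])
        · exact Or.inr (by simp [h])
      · rintro (h | h)
        · exact Or.inl (List.mem_append.mpr (Or.inl h))
        · rcases List.mem_cons.mp h with h | h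
          · exact Or.inl (List.mem_append.mpr (Or.inr (by simp [h])))
          · exact Or.inr h

-- seeding preserves the invariant (A seeds into its running in_degree, B into the zero dict)
theorem bog_seed_fold (cats : List String) :
    ∀ (E : PySem.Dict String (PySem.Set String)) (D D0 : PySem.Dict String Int),
    bogInv E D D0 →
    bogInv E (cats.foldl bogSeedA D) (cats.foldl bogSeedB D0) := by
  induction cats with
  | nil => intro E D D0 h; exact h
  | cons x cats ih =>
    intro E D D0 hInv
    obtain ⟨hmap, hndE, hnd0, hval⟩ := hInv
    rw [List.foldl_cons, List.foldl_cons]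
    apply ih
    simp only [bogSeedB]
    by_cases hx : D0.contains x = true
    · have hDx : D.contains x = true := by
        rw [bog_contains_eq D D0 (fun p => p.2 + bogCnt E.items p.1) hmap]
        exact hx
      rw [PySem.Dict.setdefault_of_contains D0 0 hx]
      simp only [bogSeedA, hDx, if_pos rfl]
      exact ⟨hmap, hndE, hnd0, hval⟩
    · have hx' : D0.contains x = false := by revert hx; cases D0.contains x <;> simp
      have hDx : D.contains x = false := by
        rw [bog_contains_eq D D0 (fun p => p.2 + bogCnt E.items p.1) hmap]
        exact hx'
      rw [PySem.Dict.setdefault_of_not_contains D0 0 hx',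
        show bogSeedA D x = D.insert x 0 from by simp [bogSeedA, hDx]]
      refine ⟨?_, hndE, PySem.Dict.nodup_keys_insert D0 x 0 hnd0, ?_⟩
      · rw [PySem.Dict.items_insert_of_not_contains D 0 hDx,
          PySem.Dict.items_insert_of_not_contains D0 0 hx', List.map_append, hmap]
        have hx0 : bogCnt E.items x = 0 := by
          apply bog_cnt_eq_zero
          intro p hp hmem
          have := (hval p hp).2 x hmem
          rw [hx'] at this
          exact absurd this (by simp)
        simp [hx0]
      · intro p hp
        refine ⟨(hval p hp).1, ?_⟩
        intro b hb
        have := (hval p hp).2 b hb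
        rw [PySem.Dict.contains_eq_decide_mem_keys] at this ⊢
        rw [PySem.Dict.keys_insert_of_not_contains D0 0 hx']
        simp at this ⊢
        exact Or.inl this

-- one outer-loop iteration: the two regime steps stay coupled
theorem bog_step (E : PySem.Dict String (PySem.Set String)) (N : PySem.Set String)
    (D D0 : PySem.Dict String Int) (rc : String × List String) (hInv : bogInv E D D0) :
    (bogStepA (E, N, D) rc).1 = (bogStepB (E, N, D0) rc).1
      ∧ (bogStepA (E, N, D) rc).2.1 = (bogStepB (E, N, D0) rc).2.1
      ∧ bogInv (bogStepA (E, N, D) rc).1 (bogStepA (E, N, D) rc).2.2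
          (bogStepB (E, N, D0) rc).2.2 := by
  simp only [bogStepA, bogStepB, PySem.List.foldl_prod_mk]
  set cats := rc.2 with hcats
  set D' := cats.foldl bogSeedA D with hD'
  set D0' := cats.foldl bogSeedB D0 with hD0'
  have hInv' : bogInv E D' D0' := bog_seed_fold cats E D D0 hInv
  have hall : ∀ ab ∈ cats.zip cats.tail, D0'.contains ab.2 = true := by
    intro ab hab
    have hb : ab.2 ∈ cats.tail := (List.of_mem_zip hab).2
    have hb' : ab.2 ∈ cats := List.mem_of_mem_tail hb
    rw [PySem.Dict.contains_eq_decide_mem_keys]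
    simp [hD0', bog_seed_keys cats D0 ab.2, hb']
  rw [bog_range_zip (fun q a b => bogEdgeA q a b) cats (E, D')]
  obtain ⟨h1, h2⟩ := bog_edge_fold D0' (cats.zip cats.tail) E D' hInv' hall
  refine ⟨h1, by trivial, ?_⟩
  rw [h1]
  exact h2

-- the coupled folds over all regimes
theorem bog_main (rcs : List (String × List String)) :
    ∀ (E : PySem.Dict String (PySem.Set String)) (N : PySem.Set String)
      (D D0 : PySem.Dict String Int), bogInv E D D0 →
    (rcs.foldl bogStepA (E, N, D)).1 = (rcs.foldl bogStepB (E, N, D0)).1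
      ∧ (rcs.foldl bogStepA (E, N, D)).2.1 = (rcs.foldl bogStepB (E, N, D0)).2.1
      ∧ bogInv (rcs.foldl bogStepA (E, N, D)).1 (rcs.foldl bogStepA (E, N, D)).2.2
          (rcs.foldl bogStepB (E, N, D0)).2.2 := by
  induction rcs with
  | nil =>
    intro E N D D0 hInv
    exact ⟨rfl, rfl, hInv⟩
  | cons rc rcs ih =>
    intro E N D D0 hInv
    obtain ⟨h1, h2, h3⟩ := bog_step E N D D0 rc hInv
    rw [List.foldl_cons, List.foldl_cons]
    have hA : bogStepA (E, N, D) rc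
        = ((bogStepA (E, N, D) rc).1, (bogStepA (E, N, D) rc).2.1,
            (bogStepA (E, N, D) rc).2.2) := rfl
    have hB : bogStepB (E, N, D0) rc
        = ((bogStepA (E, N, D) rc).1, (bogStepA (E, N, D) rc).2.1,
            (bogStepB (E, N, D0) rc).2.2) := by
      rw [h1, h2]
    rw [hA, hB]
    exact ih _ _ _ _ h3

theorem bogInv_empty : bogInv PySem.Dict.empty PySem.Dict.empty PySem.Dict.empty := by
  refine ⟨rfl, ?_, ?_, ?_⟩
  · simp [PySem.Dict.empty, PySem.Dict.keys]
  · simp [PySem.Dict.empty, PySem.Dict.keys]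
  · intro p hp
    simp [PySem.Dict.empty] at hp

-- ===== VERDICT (by name: the statement is the Claim_ definition above) =====
theorem build_ordering_graph_py_spec : Claim_equal_build_ordering_graph_py := by
  unfold Claim_equal_build_ordering_graph_py
  intro rcs _
  unfold Spec_build_ordering_graph_py build_ordering_graph_py build_ordering_graph_py_alt
  obtain ⟨h1, h2, hmap, hndE, hnd0, hval⟩ :=
    bog_main rcs PySem.Dict.empty PySem.Set.empty PySem.Dict.empty PySem.Dict.empty bogInv_empty
  set stA := rcs.foldl bogStepA (PySem.Dict.empty, PySem.Set.empty, PySem.Dict.empty)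
  set stB := rcs.foldl bogStepB (PySem.Dict.empty, PySem.Set.empty, PySem.Dict.empty)
  have hcount : (bogCount stB.1 stB.2.2).items
      = stB.2.2.items.map (fun q => (q.1, q.2 + bogCnt stB.1.items q.1)) := by
    unfold bogCount
    rw [show stB.1.values = stB.1.items.map (·.2) from rfl, List.foldl_map]
    apply bog_outer_items
    · exact hnd0
    · intro p hp b hb
      rw [← h1] at hp
      exact (hval p hp).2 b hb
  refine Prod.ext ?_ (Prod.ext ?_ ?_)
  · simp only [h1]
  · simp only [h2]
  · show stA.2.2.items = (bogCount stB.1 stB.2.2).items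
    rw [hcount, ← h1]
    exact hmap
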